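-- pv_equiv track=rewrite | github.com/micfun123/computer-sci-work | sorting my life (sort algarithoms)/stalinsort.py | Stalin_sort
-- ===== SOURCE A (Python) =====
-- def Stalin_sort(array):
--     max = array[0]
--     new_array = [max]
--     for i in array[1:]:
--         if i >= max:
--             max = i
--             new_array.append(i)
--     return new_array
-- ===== SOURCE B (Python) =====
-- def Stalin_sort(array):
--     prefix = []
--     m = array[0]
--     for x in array:
--         m = m if m >= x else x
--         prefix.append(m)
--     return [array[0]] + [x for x, p in zip(array[1:], prefix) if x >= p]
-- ===== Notes on version B (the rewrite author's own statement) =====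
-- stated objective: alternative
-- what changed: Replaces A's single mutable running-max filter loop with a two-pass decomposition: first build the prefix-maxima table, then keep each later element that is >= the prefix max of the elements before it.
import Mathlib
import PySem

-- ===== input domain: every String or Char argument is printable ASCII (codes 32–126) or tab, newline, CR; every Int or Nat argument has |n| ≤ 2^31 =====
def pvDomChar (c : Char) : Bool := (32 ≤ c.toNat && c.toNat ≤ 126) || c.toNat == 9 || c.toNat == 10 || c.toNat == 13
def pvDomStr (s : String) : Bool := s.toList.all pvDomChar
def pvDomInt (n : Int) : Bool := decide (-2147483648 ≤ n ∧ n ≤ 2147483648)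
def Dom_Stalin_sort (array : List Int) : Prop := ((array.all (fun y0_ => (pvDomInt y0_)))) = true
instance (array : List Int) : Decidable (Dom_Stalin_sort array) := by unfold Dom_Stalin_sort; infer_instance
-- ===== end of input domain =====

-- B is an alternative decomposition: a prefix-maxima table built first, then a filtering pass; return value equivalence only.

-- ===== PORT A =====
-- A: running max and accumulator list, one loop over array[1:].
def Stalin_sort (array : List Int) : List Int :=
  match PySem.List.pyGet? array 0 with
  | none => []  -- unreachable under Pre_: Python raises IndexError on the empty list
  | some m0 =>
    ((PySem.List.slice array (some 1) none).foldl
      (fun (st : Int × List Int) i => if i ≥ st.1 then (i, st.2 ++ [i]) else st)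
      (m0, [m0])).2

-- ===== PORT B =====
-- B: pass 1 builds the prefix-maxima list; pass 2 zips array[1:] with it and keeps x with x ≥ p.
def Stalin_sort_alt (array : List Int) : List Int :=
  match PySem.List.pyGet? array 0 with
  | none => []  -- unreachable under Pre_: Python raises IndexError on the empty list
  | some a0 =>
    let pfxs :=
      (array.foldl
        (fun (st : Int × List Int) x =>
          let m := if st.1 ≥ x then st.1 else x
          (m, st.2 ++ [m]))
        (a0, [])).2
    [a0] ++ ((((PySem.List.slice array (some 1) none).zip pfxs).filter
                (fun xp => xp.2 ≤ xp.1)).map Prod.fst)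

-- ===== PRECONDITION & SPEC =====
-- Pre_ excludes only the empty list, on which both Pythons raise IndexError indexing the first element.
def Pre_Stalin_sort (array : List Int) : Prop := array ≠ []
instance (array : List Int) : Decidable (Pre_Stalin_sort array) := by unfold Pre_Stalin_sort; infer_instance
def pvWitness_Stalin_sort : List Int := [3, 1, 4, 4, 2, 5]

def Spec_Stalin_sort (array : List Int) (out : List Int) : Prop := out = Stalin_sort_alt array
instance (array : List Int) (out : List Int) : Decidable (Spec_Stalin_sort array out) := by unfold Spec_Stalin_sort; infer_instance

-- ===== CLAIM (what is proved, stated in full; the proofs are below) =====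
def Claim_equal_Stalin_sort : Prop := ∀ (array : List Int), Dom_Stalin_sort array → Pre_Stalin_sort array → Spec_Stalin_sort array (Stalin_sort array)

-- ===== LEMMAS AND PROOFS =====

-- selected elements of A's loop, as a recursion
def keptA (m : Int) : List Int → List Int
  | [] => []
  | x :: xs => if x ≥ m then x :: keptA x xs else keptA m xs

-- prefix maxima of B's first pass, as a recursion
def pfx (m : Int) : List Int → List Int
  | [] => []
  | x :: xs => let m' := if m ≥ x then m else x; m' :: pfx m' xs

theorem foldlA (rest : List Int) : ∀ (m : Int) (acc : List Int),
    ((rest.foldl (fun (st : Int × List Int) i => if i ≥ st.1 then (i, st.2 ++ [i]) else st) (m, acc)).2)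
      = acc ++ keptA m rest := by
  induction rest with
  | nil => intro m acc; simp [keptA]
  | cons x xs ih =>
    intro m acc
    by_cases h : x ≥ m
    · simp [List.foldl, keptA, h, ih]
    · simp [List.foldl, keptA, h, ih]

theorem foldlB (arr : List Int) : ∀ (m : Int) (acc : List Int),
    ((arr.foldl (fun (st : Int × List Int) x =>
        let m' := if st.1 ≥ x then st.1 else x
        (m', st.2 ++ [m'])) (m, acc)).2)
      = acc ++ pfx m arr := by
  induction arr with
  | nil => intro m acc; simp [pfx]
  | cons x xs ih =>
    intro m acc
    simp [List.foldl, pfx, ih]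

theorem kept_eq_zip (t : List Int) : ∀ (m : Int),
    keptA m t = (((t.zip (m :: pfx m t)).filter (fun xp => xp.2 ≤ xp.1)).map Prod.fst) := by
  induction t with
  | nil => intro m; simp [keptA]
  | cons x xs ih =>
    intro m
    by_cases h : x ≥ m
    · have hm : (if m ≥ x then m else x) = x := by omega
      simp only [keptA, pfx, h, hm, List.zip_cons_cons, List.filter_cons]
      have hx : decide (m ≤ x) = true := by simpa using h
      simp [ih x]
    · have hm : (if m ≥ x then m else x) = m := by omega
      simp only [keptA, pfx, if_neg h, hm, List.zip_cons_cons, List.filter_cons]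
      have hx : decide (m ≤ x) = false := by simpa using h
      simp [hx, ih m]

-- ===== VERDICT (by name: the statement is the Claim_ definition above) =====
theorem Stalin_sort_spec : Claim_equal_Stalin_sort := by
  intro array _ hpre
  unfold Spec_Stalin_sort Stalin_sort Stalin_sort_alt
  match array with
  | [] => exact absurd rfl hpre
  | a0 :: t =>
    have hget : PySem.List.pyGet? (a0 :: t) (0 : Int) = some a0 := by
      simp [PySem.List.pyGet?, PySem.List.pyIdx?]
    have hslice : PySem.List.slice (a0 :: t) (some 1) none = t := by
      simp [PySem.List.slice_from_one]
    simp only [hget, hslice, foldlA, foldlB]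
    have hpfx : pfx a0 (a0 :: t) = a0 :: pfx a0 t := by
      simp [pfx]
    rw [kept_eq_zip, hpfx]
    simp
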